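-- pv_equiv track=rewrite | github.com/stelong/Historia | Historia/mech/mechanics_solution.py | divide_et_impera_phases
-- ===== SOURCE A (Python) =====
-- def divide_et_impera_phases(phase):
--     phase = [int(elem) for elem in list(phase)]
--     n = len(phase)
--     c = 0
--     p = [phase[c]]
--     idx = [c]
--     while c < n - 1:
--         c += 1
--         if phase[c] != phase[c - 1]:
--             p.append(phase[c])
--             idx.append(c - 1)
--             idx.append(c)
--     idx.append(n - 1)
--
--     return p, idx
-- ===== SOURCE B (Python) =====
-- def divide_et_impera_phases(phase):
--     vals = [int(elem) for elem in list(phase)]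
--     # Run-length encode the sequence: runs of equal values as (value, length).
--     runs = []
--     for v in vals:
--         if runs and runs[-1][0] == v:
--             runs[-1][1] += 1
--         else:
--             runs.append([v, 1])
--     p = [v for v, _ in runs]
--     # Boundary indices derived arithmetically from cumulative run lengths.
--     idx = [0]
--     pos = 0
--     for _, length in runs[:-1]:
--         pos += length
--         idx += [pos - 1, pos]
--     idx.append(len(vals) - 1)
--     return p, idx
-- ===== Notes on version B (the rewrite author's own statement) =====
-- stated objective: alternative
-- what changed: Replaces A's index-driven while-loop that compares phase[c] with phase[c-1] and records loop counters by a run-length encoding: B builds (value,length) runs by comparing each element to the last run only, then derives p from the run values and idx arithmetically from cumulative run lengths, never indexing the input.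
-- outside the precondition, e.g. on divide_et_impera_phases([]): A raises IndexError, B returns ([], [0, -1])
import Mathlib
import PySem

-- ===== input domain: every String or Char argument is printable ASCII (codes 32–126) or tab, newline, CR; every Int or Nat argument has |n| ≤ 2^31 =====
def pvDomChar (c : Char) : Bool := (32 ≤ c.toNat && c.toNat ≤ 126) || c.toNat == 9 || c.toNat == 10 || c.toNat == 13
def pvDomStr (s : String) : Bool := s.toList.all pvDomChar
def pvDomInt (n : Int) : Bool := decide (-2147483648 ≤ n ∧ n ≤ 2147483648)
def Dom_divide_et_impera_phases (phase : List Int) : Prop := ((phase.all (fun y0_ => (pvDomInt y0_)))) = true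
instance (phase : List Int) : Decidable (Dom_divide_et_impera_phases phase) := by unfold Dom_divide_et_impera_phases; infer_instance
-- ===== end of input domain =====

-- B replaces A's index-comparing while-loop by run-length encoding (runs of (value,length),
-- indices from cumulative lengths): an alternative decomposition, not claimed faster.

-- ===== PORT A =====
-- while-loop over c = 1..n-1 as a foldl over pyRange, same state (p, idx); phase[c] via pyGetD
-- (Pre_ requires phase ≠ [], so every index accessed is in range).
def divide_et_impera_phases (phase : List Int) : List Int × List Int :=
  let n : Int := phase.length
  let init : List Int × List Int := ([PySem.List.pyGetD phase 0 0], [0])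
  let s := (PySem.List.pyRange 1 n 1).foldl
    (fun (s : List Int × List Int) c =>
      if PySem.List.pyGetD phase c 0 ≠ PySem.List.pyGetD phase (c - 1) 0 then
        (s.1 ++ [PySem.List.pyGetD phase c 0], s.2 ++ [c - 1, c])
      else s) init
  (s.1, s.2 ++ [n - 1])

-- ===== PORT B =====
-- Source B's run-building loop: compare each element to the last run (runs[-1][0]), extend it or append a new run
def divide_et_impera_phases_alt (phase : List Int) : List Int × List Int :=
  let runs : List (Int × Int) := phase.foldl
    (fun (runs : List (Int × Int)) v =>
      match runs.getLast? with
      | some (w, k) => if w = v then runs.dropLast ++ [(v, k + 1)] else runs ++ [(v, 1)]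
      | none => runs ++ [(v, 1)]) []
  let p := runs.map Prod.fst
  let s := runs.dropLast.foldl
    (fun (s : List Int × Int) (r : Int × Int) =>
      (s.1 ++ [s.2 + r.2 - 1, s.2 + r.2], s.2 + r.2)) ([0], 0)
  (p, s.1 ++ [(phase.length : Int) - 1])

-- ===== PRECONDITION & SPEC =====
-- Pre_ excludes the empty list, on which A raises IndexError (phase[0]).
def Pre_divide_et_impera_phases (phase : List Int) : Prop := phase ≠ []
instance (phase : List Int) : Decidable (Pre_divide_et_impera_phases phase) := by unfold Pre_divide_et_impera_phases; infer_instance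
def pvWitness_divide_et_impera_phases : List Int := [1, 1, 2]

def Spec_divide_et_impera_phases (phase : List Int) (out : List Int × List Int) : Prop := out = divide_et_impera_phases_alt phase
instance (phase : List Int) (out : List Int × List Int) : Decidable (Spec_divide_et_impera_phases phase out) := by unfold Spec_divide_et_impera_phases; infer_instance

-- ===== CLAIM =====
def Claim_equal_divide_et_impera_phases : Prop := ∀ (phase : List Int), Dom_divide_et_impera_phases phase → Pre_divide_et_impera_phases phase → Spec_divide_et_impera_phases phase (divide_et_impera_phases phase)

-- ===== LEMMAS AND PROOFS =====

-- positions (with values) where a new run starts, scanning l with previous value v from position pos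
def pvBrk (v : Int) (l : List Int) (pos : Int) : List (Int × Int) :=
  match l with
  | [] => []
  | x :: xs => if x ≠ v then (pos, x) :: pvBrk x xs (pos + 1) else pvBrk x xs (pos + 1)

-- reference run-length encoding: current run value v, current count k, remaining list l
def pvRle (v : Int) (k : Int) (l : List Int) : List (Int × Int) :=
  match l with
  | [] => [(v, k)]
  | x :: xs => if v = x then pvRle v (k + 1) xs else (v, k) :: pvRle x 1 xs

lemma foldl_ap (pred : Int → Prop) [DecidablePred pred] (f : Int → Int) (g : Int → List Int) :
    ∀ (l : List Int) (a b : List Int),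
      l.foldl (fun (s : List Int × List Int) c =>
        if pred c then (s.1 ++ [f c], s.2 ++ g c) else s) (a, b)
      = (a ++ (l.filter (fun c => decide (pred c))).map f,
         b ++ (l.filter (fun c => decide (pred c))).flatMap g) := by
  intro l
  induction l with
  | nil => intro a b; simp
  | cons x xs ih =>
    intro a b
    by_cases h : pred x
    · simp [List.foldl_cons, h, ih]
    · simp [List.foldl_cons, h, ih]

lemma getD_append_cons (pre : List Int) (v : Int) (l : List Int) :
    (pre ++ v :: l).getD pre.length 0 = v := by
  simp [List.getD]

-- A's filter over pyRange, paired with the values there, is pvBrk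
lemma brk_char (phase : List Int) :
    ∀ (l : List Int) (pre : List Int) (v : Int), phase = pre ++ v :: l →
      ((PySem.List.pyRange ((pre.length : Int) + 1) (phase.length : Int) 1).filter
          (fun c => decide (PySem.List.pyGetD phase c 0 ≠ PySem.List.pyGetD phase (c - 1) 0))).map
        (fun i => (i, PySem.List.pyGetD phase i 0))
      = pvBrk v l ((pre.length : Int) + 1) := by
  intro l
  induction l with
  | nil =>
    intro pre v h
    subst h
    rw [PySem.List.pyRange_one_eq_nil (by simp)]
    rfl
  | cons x xs ih =>
    intro pre v h
    subst h
    have hlen : ((pre.length : Int) + 1) < (((pre ++ v :: x :: xs).length : Nat) : Int) := by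
      push_cast [List.length_append, List.length_cons]; omega
    have hx : PySem.List.pyGetD (pre ++ v :: x :: xs) ((pre.length : Int) + 1) 0 = x := by
      have e : ((pre.length : Int) + 1) = ((pre.length + 1 : Nat) : Int) := by push_cast; ring
      rw [e, PySem.List.pyGetD_natCast]
      have e2 : pre ++ v :: x :: xs = (pre ++ [v]) ++ x :: xs := by simp
      rw [e2]
      have := getD_append_cons (pre ++ [v]) x xs
      simpa using this
    have hv : PySem.List.pyGetD (pre ++ v :: x :: xs) ((pre.length : Int) + 1 - 1) 0 = v := by
      have e : ((pre.length : Int) + 1 - 1) = ((pre.length : Nat) : Int) := by ring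
      rw [e, PySem.List.pyGetD_natCast, getD_append_cons]
    rw [PySem.List.pyRange_one_cons hlen, List.filter_cons]
    have ih' := ih (pre ++ [v]) x (by simp)
    simp only [List.length_append, List.length_cons, List.length_nil] at ih'
    push_cast at ih'
    rw [pvBrk]
    have hlen2 : (((pre ++ v :: x :: xs).length : Nat) : Int)
        = (pre.length : Int) + ((xs.length : Int) + 1 + 1) := by
      push_cast [List.length_append, List.length_cons]; ring
    rw [hlen2] at *
    simp only [ne_eq] at ih' ⊢
    by_cases hne : x = v
    · rw [if_neg (by rw [hx, hv]; simp [hne]), if_neg (by simp [hne])]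
      exact ih'
    · rw [if_pos (by rw [hx, hv]; simp [hne]), if_pos (by simp [hne])]
      simp only [List.map_cons, hx]
      exact congrArg _ ih'

-- Source B's run-building loop equals pvRle
lemma runs_fold (step : List (Int × Int) → Int → List (Int × Int))
    (hstep : step = fun runs v =>
      match runs.getLast? with
      | some (w, k) => if w = v then runs.dropLast ++ [(v, k + 1)] else runs ++ [(v, 1)]
      | none => runs ++ [(v, 1)]) :
    ∀ (l : List Int) (acc : List (Int × Int)) (v k : Int),
      l.foldl step (acc ++ [(v, k)]) = acc ++ pvRle v k l := by
  intro l
  induction l with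
  | nil => intro acc v k; simp [pvRle]
  | cons x xs ih =>
    intro acc v k
    rw [List.foldl_cons, hstep]
    simp only [List.getLast?_concat, List.dropLast_concat]
    by_cases h : v = x
    · simp only [h, if_true, ite_true]
      rw [← hstep, ih, pvRle]
      simp [h]
    · simp only [h, if_false, ite_false]
      rw [pvRle]
      simp only [h, if_false, ite_false]
      have : acc ++ [(v, k)] ++ [(x, 1)] = (acc ++ [(v, k)]) ++ [(x, 1)] := by simp
      rw [this, ← hstep, ih]
      simp

lemma pvRle_ne_nil (v k : Int) (l : List Int) : pvRle v k l ≠ [] := by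
  induction l generalizing v k with
  | nil => simp [pvRle]
  | cons x xs ih => rw [pvRle]; split <;> simp [ih]

lemma rle_map_fst (l : List Int) :
    ∀ (v k pos : Int), (pvRle v k l).map Prod.fst = v :: (pvBrk v l pos).map Prod.snd := by
  induction l with
  | nil => intro v k pos; simp [pvRle, pvBrk]
  | cons x xs ih =>
    intro v k pos
    rw [pvRle, pvBrk]
    by_cases h : v = x
    · simp only [h, if_true, ite_true, ne_eq, not_true_eq_false, if_false, ite_false]
      exact ih x (k + 1) (pos + 1)
    · have h' : x ≠ v := fun e => h e.symm
      simp only [h, if_false, ite_false, ne_eq, h', not_false_eq_true, if_true, ite_true,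
        List.map_cons]
      rw [ih x 1 (pos + 1)]

lemma idx_fold (l : List Int) :
    ∀ (v k pos : Int) (acc : List Int),
      ∃ q, ((pvRle v k l).dropLast).foldl
        (fun (s : List Int × Int) (r : Int × Int) =>
          (s.1 ++ [s.2 + r.2 - 1, s.2 + r.2], s.2 + r.2)) (acc, pos)
      = (acc ++ (pvBrk v l (pos + k)).flatMap (fun r => [r.1 - 1, r.1]), q) := by
  induction l with
  | nil => intro v k pos acc; exact ⟨pos, by simp [pvRle, pvBrk]⟩
  | cons x xs ih =>
    intro v k pos acc
    rw [pvRle, pvBrk]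
    by_cases h : v = x
    · simp only [h, if_true, ite_true, ne_eq, not_true_eq_false, if_false, ite_false]
      obtain ⟨q, hq⟩ := ih x (k + 1) pos acc
      refine ⟨q, ?_⟩
      rw [hq]
      congr 2
      ring
    · have h' : x ≠ v := fun e => h e.symm
      simp only [h, if_false, ite_false, ne_eq, h', not_false_eq_true, if_true, ite_true]
      obtain ⟨b, bs, hbs⟩ : ∃ b bs, pvRle x 1 xs = b :: bs := by
        cases hE : pvRle x 1 xs with
        | nil => exact absurd hE (pvRle_ne_nil x 1 xs)
        | cons b bs => exact ⟨b, bs, rfl⟩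
      rw [hbs, List.dropLast_cons₂, List.foldl_cons, ← hbs]
      obtain ⟨q, hq⟩ := ih x 1 (pos + k) (acc ++ [pos + k - 1, pos + k])
      refine ⟨q, ?_⟩
      rw [hq]
      simp [List.flatMap_cons]

theorem divide_et_impera_phases_spec : Claim_equal_divide_et_impera_phases := by
  intro phase _ hpre
  obtain ⟨v, rest, rfl⟩ : ∃ v rest, phase = v :: rest := by
    cases phase with
    | nil => exact absurd rfl hpre
    | cons v rest => exact ⟨v, rest, rfl⟩
  unfold Spec_divide_et_impera_phases divide_et_impera_phases divide_et_impera_phases_alt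
  simp only []
  rw [foldl_ap (fun c => PySem.List.pyGetD (v :: rest) c 0 ≠ PySem.List.pyGetD (v :: rest) (c - 1) 0)
      (fun c => PySem.List.pyGetD (v :: rest) c 0) (fun c => [c - 1, c])]
  have hpairs := brk_char (v :: rest) rest [] v rfl
  simp only [List.length_nil, Nat.cast_zero, zero_add] at hpairs
  have hfilter : ((PySem.List.pyRange 1 (((v :: rest).length : Nat) : Int) 1).filter
      (fun c => decide (PySem.List.pyGetD (v :: rest) c 0 ≠ PySem.List.pyGetD (v :: rest) (c - 1) 0)))
      = (pvBrk v rest 1).map Prod.fst := by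
    have h2 := congrArg (List.map Prod.fst) hpairs
    simp only [List.map_map] at h2
    simpa [Function.comp_def] using h2
  have hmapg : ((PySem.List.pyRange 1 (((v :: rest).length : Nat) : Int) 1).filter
      (fun c => decide (PySem.List.pyGetD (v :: rest) c 0 ≠ PySem.List.pyGetD (v :: rest) (c - 1) 0))).map
        (fun c => PySem.List.pyGetD (v :: rest) c 0)
      = (pvBrk v rest 1).map Prod.snd := by
    have h2 := congrArg (List.map Prod.snd) hpairs
    simp only [List.map_map] at h2
    simpa [Function.comp_def] using h2
  have hruns : (v :: rest).foldl
      (fun (runs : List (Int × Int)) w =>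
        match runs.getLast? with
        | some (u, k) => if u = w then runs.dropLast ++ [(w, k + 1)] else runs ++ [(w, 1)]
        | none => runs ++ [(w, 1)]) ([] : List (Int × Int)) = pvRle v 1 rest := by
    rw [List.foldl_cons]
    simpa using runs_fold _ rfl rest [] v 1
  obtain ⟨q, hq⟩ := idx_fold rest v 1 0 [0]
  rw [hmapg, hfilter, hruns]
  rw [rle_map_fst rest v 1 1, hq]
  simp [List.flatMap_map, PySem.List.pyGetD_zero_cons]
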